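-- pv_equiv track=rewrite | github.com/tomshenry87/tools | mikrotik_version_check/mikrotik_checker.py | get_routeros_version
-- ===== SOURCE A (Python) =====
-- def get_routeros_version(packages: list[dict]) -> str | None:
--     for pkg in packages:
--         if "routeros" in pkg["name"].lower():
--             return pkg["version"]
--     for pkg in packages:
--         if pkg["name"].lower() == "system":
--             return pkg["version"]
--     if packages:
--         return packages[0]["version"]
--     return None
-- ===== SOURCE B (Python) =====
-- def get_routeros_version(packages: list[dict]) -> str | None:
--     # single pass: return on routeros immediately, remember the first
--     # 'system' package (the reference, not its version) as fallback
--     system_pkg = None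
--     for pkg in packages:
--         name = pkg["name"].lower()
--         if "routeros" in name:
--             return pkg["version"]
--         if system_pkg is None and name == "system":
--             system_pkg = pkg
--     if system_pkg is not None:
--         return system_pkg["version"]
--     if packages:
--         return packages[0]["version"]
--     return None
-- ===== Notes on version B (the rewrite author's own statement) =====
-- stated objective: alternative
-- what changed: Replaces A's three sequential passes (routeros scan, system scan, head fallback) by a single pass that keeps a reference to the first 'system' package as fallback and resolves the fallback after the loop.
import Mathlib
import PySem

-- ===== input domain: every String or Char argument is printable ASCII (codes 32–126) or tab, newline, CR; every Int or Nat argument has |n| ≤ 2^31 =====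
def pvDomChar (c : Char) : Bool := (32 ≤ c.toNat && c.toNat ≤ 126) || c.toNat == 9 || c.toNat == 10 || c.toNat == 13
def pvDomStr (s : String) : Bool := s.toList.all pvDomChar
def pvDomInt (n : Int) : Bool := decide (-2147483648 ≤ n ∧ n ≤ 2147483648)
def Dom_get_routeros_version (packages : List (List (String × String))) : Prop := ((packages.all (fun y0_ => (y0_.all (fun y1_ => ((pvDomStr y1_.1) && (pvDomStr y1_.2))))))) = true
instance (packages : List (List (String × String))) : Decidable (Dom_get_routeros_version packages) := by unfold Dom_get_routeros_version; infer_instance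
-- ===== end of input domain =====

-- ===== PORT A =====
-- B folds A's three passes into one pass keeping a reference to the first 'system' package.
-- A raising KeyError (a read "name"/"version" key missing) is excluded by Pre_;
-- pvGet returns "" there (never reached inside Pre_).
def pvGet (pkg : List (String × String)) (k : String) : String :=
  ((pkg.find? (fun p => p.1 == k)).map (fun p => p.2)).getD ""

def pvALoop1 : List (List (String × String)) → Option String
  | [] => none
  | pkg :: rest =>
    if PySem.Str.isIn "routeros" (PySem.Str.lower (pvGet pkg "name")) then some (pvGet pkg "version")
    else pvALoop1 rest

def pvALoop2 : List (List (String × String)) → Option String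
  | [] => none
  | pkg :: rest =>
    if PySem.Str.lower (pvGet pkg "name") == "system" then some (pvGet pkg "version")
    else pvALoop2 rest

def get_routeros_version (packages : List (List (String × String))) : Option String :=
  match pvALoop1 packages with
  | some v => some v
  | none =>
    match pvALoop2 packages with
    | some v => some v
    | none =>
      match packages with
      | [] => none
      | pkg :: _ => some (pvGet pkg "version")

-- ===== PORT B =====
-- the loop: Sum.inl v = early 'return pkg["version"]' on a routeros match,
-- Sum.inr sysPkg = loop finished with the remembered first 'system' package
def pvBLoop : List (List (String × String)) → Option (List (String × String)) →
    Sum String (Option (List (String × String)))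
  | [], sysPkg => Sum.inr sysPkg
  | pkg :: rest, sysPkg =>
    let name := PySem.Str.lower (pvGet pkg "name")
    if PySem.Str.isIn "routeros" name then Sum.inl (pvGet pkg "version")
    else
      pvBLoop rest
        (if sysPkg.isNone && (name == "system") then some pkg else sysPkg)

def get_routeros_version_alt (packages : List (List (String × String))) : Option String :=
  match pvBLoop packages none with
  | Sum.inl v => some v
  | Sum.inr (some sp) => some (pvGet sp "version")
  | Sum.inr none =>
    match packages with
    | [] => none
    | pkg :: _ => some (pvGet pkg "version")

-- ===== PRECONDITION & SPEC =====
def pvHasKey (pkg : List (String × String)) (k : String) : Bool :=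
  (pkg.find? (fun p => p.1 == k)).isSome
def pvIsR (pkg : List (String × String)) : Bool :=
  PySem.Str.isIn "routeros" (PySem.Str.lower (pvGet pkg "name"))
def pvIsSys (pkg : List (String × String)) : Bool :=
  PySem.Str.lower (pvGet pkg "name") == "system"

-- Pre_ = exactly the inputs where Python A returns (no KeyError): every package read before
-- the first routeros match has a "name" key, and the package whose "version" is returned has one.
def Pre_get_routeros_version (packages : List (List (String × String))) : Prop :=
  let pre := packages.takeWhile (fun p => pvHasKey p "name" && !(pvIsR p))
  (pre.length < packages.length ∧ pvIsR (packages.getD pre.length []) = true ∧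
     pvHasKey (packages.getD pre.length []) "version" = true) ∨
  (pre.length = packages.length ∧
    (let sysPre := packages.takeWhile (fun p => !(pvIsSys p))
     (sysPre.length < packages.length ∧
        pvHasKey (packages.getD sysPre.length []) "version" = true) ∨
     (sysPre.length = packages.length ∧
        (packages = [] ∨ pvHasKey (packages.headD []) "version" = true))))
instance (packages : List (List (String × String))) : Decidable (Pre_get_routeros_version packages) := by
  unfold Pre_get_routeros_version; infer_instance

def pvWitness_get_routeros_version : (List (List (String × String))) :=
  [[("name", "other"), ("version", "6.9")], [("name", "system"), ("version", "7.1")]]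

def Spec_get_routeros_version (packages : List (List (String × String))) (out : Option String) : Prop := out = get_routeros_version_alt packages
instance (packages : List (List (String × String))) (out : Option String) : Decidable (Spec_get_routeros_version packages out) := by unfold Spec_get_routeros_version; infer_instance

-- ===== CLAIM (what is proved, stated in full; the proofs are below) =====
def Claim_equal_get_routeros_version : Prop := ∀ (packages : List (List (String × String))), Dom_get_routeros_version packages → Pre_get_routeros_version packages → Spec_get_routeros_version packages (get_routeros_version packages)

-- ===== LEMMAS AND PROOFS =====

-- the first package whose lowered name is "system"
def pvFirstSys : List (List (String × String)) → Option (List (String × String))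
  | [] => none
  | pkg :: rest =>
    if PySem.Str.lower (pvGet pkg "name") == "system" then some pkg else pvFirstSys rest

theorem pvALoop2_eq_firstSys (pkgs : List (List (String × String))) :
    pvALoop2 pkgs = (pvFirstSys pkgs).map (fun p => pvGet p "version") := by
  induction pkgs with
  | nil => rfl
  | cons pkg rest ih =>
    simp only [pvALoop2, pvFirstSys]
    split
    · rfl
    · simpa using ih

theorem pvBLoop_characterisation (pkgs : List (List (String × String)))
    (sysPkg : Option (List (String × String))) :
    pvBLoop pkgs sysPkg =
      match pvALoop1 pkgs with
      | some v => Sum.inl v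
      | none => Sum.inr (match sysPkg with | some s => some s | none => pvFirstSys pkgs) := by
  induction pkgs generalizing sysPkg with
  | nil => cases sysPkg <;> rfl
  | cons pkg rest ih =>
    simp only [pvBLoop, pvALoop1]
    split
    · rfl
    · rw [ih]
      cases sysPkg with
      | some s => simp
      | none =>
        by_cases hs : PySem.Str.lower (pvGet pkg "name") == "system" <;>
          simp [pvFirstSys, hs]

-- ===== VERDICT (by name: the statement is the Claim_ definition above) =====
theorem get_routeros_version_spec : Claim_equal_get_routeros_version := by
  intro packages _ _
  show get_routeros_version packages = get_routeros_version_alt packages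
  rw [get_routeros_version_alt.eq_def, pvBLoop_characterisation, get_routeros_version.eq_def,
    pvALoop2_eq_firstSys]
  cases pvALoop1 packages with
  | some v => rfl
  | none => cases pvFirstSys packages <;> cases packages <;> rfl
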